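-- pv_equiv track=rewrite | github.com/lzhang666/network-projects | UDP ping client/udp_ping_client.py | verifyChecksum
-- ===== SOURCE A (Python) =====
-- def verifyChecksum(recvMsg):
--     """
--     this function verifies the received message against its checksum
--     """
--     carryOver = 1 << 16
--     totalSum = 0
--     for i in range(0, len(recvMsg), 2):
--         totalSum = totalSum + (recvMsg[i] << 8) + recvMsg[i + 1]
--         if totalSum >= carryOver:
--             totalSum = totalSum + 1 - carryOver
--     return totalSum == 65535
-- ===== SOURCE B (Python) =====
-- def verifyChecksum(recvMsg):
--     """
--     this function verifies the received message against its checksum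
--     """
--     total = sum(b << (8 * ((i + 1) % 2)) for i, b in enumerate(recvMsg))
--     while total >= 65536:
--         total = total % 65536 + total // 65536
--     return total == 65535
-- ===== Notes on version B (the rewrite author's own statement) =====
-- stated objective: alternative
-- what changed: B computes one carry-free weighted byte sum in a single enumerate pass (high bytes weighted 256) and normalises all end-around carries afterwards in a separate reduction loop, instead of A's paired indexing with a conditional end-around carry inside every iteration.
-- outside the precondition, e.g. on verifyChecksum([768, -3]): A returns False, B returns True
import Mathlib
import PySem

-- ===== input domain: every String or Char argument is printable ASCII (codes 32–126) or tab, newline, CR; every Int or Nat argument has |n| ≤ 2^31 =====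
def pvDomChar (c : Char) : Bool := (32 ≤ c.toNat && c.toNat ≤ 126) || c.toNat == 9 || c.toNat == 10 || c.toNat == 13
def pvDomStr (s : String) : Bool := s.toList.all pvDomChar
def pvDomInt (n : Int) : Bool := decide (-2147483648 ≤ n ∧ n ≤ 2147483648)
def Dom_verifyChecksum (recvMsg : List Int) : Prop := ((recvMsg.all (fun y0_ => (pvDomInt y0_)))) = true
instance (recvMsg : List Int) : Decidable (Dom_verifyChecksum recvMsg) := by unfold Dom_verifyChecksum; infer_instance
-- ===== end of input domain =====

-- B replaces A's paired loop with per-step end-around carry by one carry-free weighted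
-- sum over enumerate (high bytes weighted 256) followed by a separate normalisation
-- loop, then the comparison (objective: alternative decomposition, same O(n) cost).

-- ===== PORT A =====
-- A's for-loop over range(0, len(recvMsg), 2); the Option state is the possible
-- IndexError of recvMsg[i] / recvMsg[i + 1] (none = the loop raised).
def vcStepA (recvMsg : List Int) (acc : Option Int) (i : Int) : Option Int :=
  match acc with
  | none => none
  | some totalSum =>
    match PySem.List.pyGet? recvMsg i, PySem.List.pyGet? recvMsg (i + 1) with
    | some a, some b =>
        let t := totalSum + (a <<< (8 : Nat)) + b
        some (if t ≥ (1 <<< (16 : Nat) : Int) then t + 1 - (1 <<< (16 : Nat) : Int) else t)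
    | _, _ => none

def verifyChecksum (recvMsg : List Int) : Bool :=
  match (PySem.List.pyRange 0 (recvMsg.length : Int) 2).foldl (vcStepA recvMsg) (some 0) with
  | some totalSum => totalSum == 65535
  | none => false   -- unreachable inside Pre_ (A raised IndexError)

-- ===== PORT B =====
-- Source B's `b << (8 * ((i + 1) % 2))` term of the generator expression
def vcTerm (p : Int × Int) : Int := p.2 <<< (8 * PySem.Int.mod (p.1 + 1) 2).toNat

-- Source B's `while total >= 65536: total = total % 65536 + total // 65536`
def vcReduce (t : Int) : Int :=
  if _h : 65536 ≤ t then
    vcReduce (PySem.Int.mod t 65536 + PySem.Int.floordiv t 65536)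
  else t
termination_by t.toNat
decreasing_by
  rw [PySem.Int.mod_eq_emod_of_pos (by norm_num : (0:Int) < 65536),
      PySem.Int.floordiv_eq_ediv_of_pos (by norm_num : (0:Int) < 65536)]
  omega

def verifyChecksum_alt (recvMsg : List Int) : Bool :=
  vcReduce (((PySem.List.enumerate recvMsg 0).map vcTerm).sum) == 65535

-- ===== PRECONDITION & SPEC =====
-- the 16-bit words of the message (256*recvMsg[2k] + recvMsg[2k+1]), used only to state Pre_
def pvPairVals : List Int → List Int
  | hi :: lo :: rest => (256 * hi + lo) :: pvPairVals rest
  | _ => []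

-- Pre_ excludes the odd-length messages, on which A raises IndexError, and the
-- degenerate non-byte messages (some 16-bit word outside 0..65535) whose word sum is a
-- multiple of 65535: a one's-complement checksum is unspecified outside byte data and
-- there A's and B's verdicts both defensibly disagree; everywhere else A = B is claimed.
def Pre_verifyChecksum (recvMsg : List Int) : Prop :=
  recvMsg.length % 2 = 0 ∧
  (PySem.Int.mod (pvPairVals recvMsg).sum 65535 ≠ 0 ∨
    ∀ p ∈ pvPairVals recvMsg, 0 ≤ p ∧ p ≤ 65535)
instance (recvMsg : List Int) : Decidable (Pre_verifyChecksum recvMsg) := by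
  unfold Pre_verifyChecksum; infer_instance

def pvWitness_verifyChecksum : List Int := [255, 255]

def Spec_verifyChecksum (recvMsg : List Int) (out : Bool) : Prop := out = verifyChecksum_alt recvMsg
instance (recvMsg : List Int) (out : Bool) : Decidable (Spec_verifyChecksum recvMsg out) := by unfold Spec_verifyChecksum; infer_instance

-- ===== CLAIM (what is proved, stated in full; the proofs are below) =====
def Claim_equal_verifyChecksum : Prop := ∀ (recvMsg : List Int), Dom_verifyChecksum recvMsg → Pre_verifyChecksum recvMsg → Spec_verifyChecksum recvMsg (verifyChecksum recvMsg)

-- ===== LEMMAS AND PROOFS =====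

-- A's loop, written as structural recursion two elements at a time (proof helper)
def vcRunA (t : Int) : List Int → Int
  | hi :: lo :: rest =>
      let s := t + (hi <<< (8 : Nat)) + lo
      vcRunA (if s > 0xFFFF then s - 0xFFFF else s) rest
  | _ => t

-- step-2 range: empty and cons forms
lemma pyRange_two_nil (a b : Int) (h : b ≤ a) : PySem.List.pyRange a b 2 = [] := by
  rw [PySem.List.pyRange_of_pos a b (by norm_num)]
  simp [show ¬ a < b by omega]

lemma pyRange_two_cons (a b : Int) (h : a < b) :
    PySem.List.pyRange a b 2 = a :: PySem.List.pyRange (a + 2) b 2 := by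
  rw [PySem.List.pyRange_of_pos a b (by norm_num),
      PySem.List.pyRange_of_pos (a + 2) b (by norm_num)]
  have hcnt : (if a < b then ((b - a + 2 - 1) / 2).toNat else 0)
      = (if a + 2 < b then ((b - (a + 2) + 2 - 1) / 2).toNat else 0) + 1 := by
    split_ifs <;> omega
  rw [hcnt, List.range_succ_eq_map, List.map_cons, List.map_map]
  refine congrArg₂ _ (by simp) ?_
  refine List.map_congr_left fun k _ => ?_
  simp only [Function.comp]
  push_cast
  ring

-- the loop of A, started at an even offset i, computes vcRunA on the suffix
lemma vc_chain (msg : List Int) : ∀ (i : Nat) (t : Int), 2 ∣ (msg.length - i) → i ≤ msg.length →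
    (PySem.List.pyRange (i : Int) (msg.length : Int) 2).foldl (vcStepA msg) (some t)
      = some (vcRunA t (msg.drop i)) := by
  intro i
  induction hn : msg.length - i using Nat.strong_induction_on generalizing i with
  | _ n ih =>
    intro t hdvd hle
    rcases Nat.eq_or_lt_of_le hle with heq | hlt
    · rw [pyRange_two_nil _ _ (by exact_mod_cast le_of_eq heq.symm)]
      simp [heq, vcRunA]
    · have h1 : i + 1 < msg.length := by omega
      rw [pyRange_two_cons _ _ (by exact_mod_cast hlt)]
      rw [List.foldl_cons]
      have hga : PySem.List.pyGet? msg (i : Int) = some msg[i] := by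
        rw [PySem.List.pyGet?_natCast]; simp [Nat.lt_of_succ_lt h1]
      have hgb : PySem.List.pyGet? msg ((i : Int) + 1) = some msg[i + 1] := by
        have : ((i : Int) + 1) = ((i + 1 : Nat) : Int) := by push_cast; ring
        rw [this, PySem.List.pyGet?_natCast]; simp [List.getElem?_eq_getElem h1]
      have hstep : vcStepA msg (some t) (i : Int)
          = some (if t + (msg[i] <<< (8 : Nat)) + msg[i + 1] > 0xFFFF
                  then t + (msg[i] <<< (8 : Nat)) + msg[i + 1] - 0xFFFF
                  else t + (msg[i] <<< (8 : Nat)) + msg[i + 1]) := by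
        simp only [vcStepA, hga, hgb]
        congr 1
        split_ifs <;> omega
      rw [hstep]
      have hcast : ((i : Int) + 2) = ((i + 2 : Nat) : Int) := by push_cast; ring
      rw [hcast, ih (msg.length - (i + 2)) (by omega) (i + 2) rfl _ (by omega) (by omega)]
      have hdrop : msg.drop i = msg[i] :: msg[i + 1] :: msg.drop (i + 2) := by
        rw [List.drop_eq_getElem_cons (by omega), List.drop_eq_getElem_cons h1]
      rw [hdrop]
      rfl

lemma shl8 (a : Int) : a <<< (8 : Nat) = 256 * a := by rw [Int.shiftLeft_eq]; ring

-- word sums from bounded words are nonnegative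
lemma pairSum_nonneg (xs : List Int) (hb : ∀ p ∈ pvPairVals xs, 0 ≤ p ∧ p ≤ 65535) :
    0 ≤ (pvPairVals xs).sum :=
  List.sum_nonneg fun p hp => (hb p hp).1

-- vcRunA is congruent, mod 65535, to the start value plus the word sum
lemma vcRunA_modeq (xs : List Int) : ∀ t : Int,
    vcRunA t xs ≡ t + (pvPairVals xs).sum [ZMOD 65535] := by
  induction xs using pvPairVals.induct with
  | case1 hi lo rest ih =>
      intro t
      simp only [vcRunA, pvPairVals, List.sum_cons]
      refine (ih _).trans ?_
      have hd : (65535 : Int) ∣ (t + (256 * hi + lo))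
          - (if t + hi <<< (8:Nat) + lo > 0xFFFF
             then t + hi <<< (8:Nat) + lo - 0xFFFF else t + hi <<< (8:Nat) + lo) := by
        rw [shl8]; split_ifs
        · exact ⟨1, by ring⟩
        · exact ⟨0, by ring⟩
      calc (if t + hi <<< (8:Nat) + lo > 0xFFFF then t + hi <<< (8:Nat) + lo - 0xFFFF
              else t + hi <<< (8:Nat) + lo) + (pvPairVals rest).sum
          ≡ (t + (256 * hi + lo)) + (pvPairVals rest).sum [ZMOD 65535] :=
            Int.ModEq.add_right _ (Int.modEq_iff_dvd.2 hd)
        _ = t + (256 * hi + lo + (pvPairVals rest).sum) := by ring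
  | case2 xs h =>
      intro t
      match xs, h with
      | [], _ => simp [vcRunA, pvPairVals]
      | [x], _ => simp [vcRunA, pvPairVals]
      | hi :: lo :: rest, h => exact (h hi lo rest rfl).elim

-- with every word in 0..65535 the running total stays in 0..65535 and is 0 only on total-zero input
lemma vcRunA_inv (xs : List Int) : ∀ t : Int,
    (∀ p ∈ pvPairVals xs, 0 ≤ p ∧ p ≤ 65535) → 0 ≤ t → t ≤ 65535 →
    0 ≤ vcRunA t xs ∧ vcRunA t xs ≤ 65535 ∧
      (vcRunA t xs = 0 ↔ t + (pvPairVals xs).sum = 0) := by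
  induction xs using pvPairVals.induct with
  | case1 hi lo rest ih =>
      intro t hb h0 h1
      have hp := hb (256 * hi + lo) (by simp [pvPairVals])
      have hrest : ∀ p ∈ pvPairVals rest, 0 ≤ p ∧ p ≤ 65535 := by
        intro p hp'; exact hb p (by simp [pvPairVals, hp'])
      have hrs := pairSum_nonneg rest hrest
      simp only [vcRunA, pvPairVals, List.sum_cons]
      rw [shl8]
      by_cases hc : t + 256 * hi + lo > 0xFFFF
      · rw [if_pos hc]
        obtain ⟨ha, hb', hz⟩ := ih (t + 256 * hi + lo - 0xFFFF) hrest (by omega) (by omega)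
        exact ⟨ha, hb', by rw [hz]; constructor <;> (intro h; omega)⟩
      · rw [if_neg hc]
        obtain ⟨ha, hb', hz⟩ := ih (t + 256 * hi + lo) hrest (by omega) (by omega)
        exact ⟨ha, hb', by rw [hz]; constructor <;> (intro h; omega)⟩
  | case2 xs h =>
      intro t hb h0 h1
      match xs, h with
      | [], _ => simp only [vcRunA, pvPairVals, List.sum_nil]; omega
      | [x], _ => simp only [vcRunA, pvPairVals, List.sum_nil]; omega
      | hi :: lo :: rest, h => exact (h hi lo rest rfl).elim

-- B's normalisation loop reaches 65535 exactly on the positive multiples of 65535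
lemma vcReduce_eq_iff (t : Int) : vcReduce t = 65535 ↔ 0 < t ∧ (65535 : Int) ∣ t := by
  induction t using vcReduce.induct with
  | case1 t h ih =>
      rw [vcReduce, dif_pos h]
      rw [PySem.Int.mod_eq_emod_of_pos (by norm_num : (0:Int) < 65536),
          PySem.Int.floordiv_eq_ediv_of_pos (by norm_num : (0:Int) < 65536)] at ih ⊢
      rw [ih]
      constructor <;> rintro ⟨hpos, hdvd⟩ <;> exact ⟨by omega, by omega⟩
  | case2 t h =>
      rw [vcReduce, dif_neg h]
      constructor
      · rintro rfl; exact ⟨by norm_num, dvd_refl _⟩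
      · rintro ⟨hpos, hdvd⟩; omega

-- B's enumerate sum is the word sum (even start index, even length)
lemma esum (xs : List Int) : ∀ s : Int, s % 2 = 0 → xs.length % 2 = 0 →
    ((PySem.List.enumerate xs s).map vcTerm).sum = (pvPairVals xs).sum := by
  induction xs using pvPairVals.induct with
  | case1 hi lo rest ih =>
      intro s hs hlen
      rw [PySem.List.enumerate_cons, PySem.List.enumerate_cons]
      simp only [List.map_cons, List.sum_cons, pvPairVals, List.sum_cons]
      have h1 : vcTerm (s, hi) = 256 * hi := by
        simp only [vcTerm]
        rw [PySem.Int.mod_eq_emod_of_pos (by norm_num : (0:Int) < 2)]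
        have he : (s + 1) % 2 = 1 := by omega
        rw [he]
        exact shl8 hi
      have h2 : vcTerm (s + 1, lo) = lo := by
        simp only [vcTerm]
        rw [PySem.Int.mod_eq_emod_of_pos (by norm_num : (0:Int) < 2)]
        have he : (s + 1 + 1) % 2 = 0 := by omega
        rw [he]
        norm_num
      rw [h1, h2, ih (s + 1 + 1) (by omega)
        (by simp only [List.length_cons] at hlen; omega)]
      ring
  | case2 xs h =>
      intro s hs hlen
      match xs, h with
      | [], _ => simp [PySem.List.enumerate_nil, pvPairVals]
      | [x], _ => simp at hlen
      | hi :: lo :: rest, h => exact (h hi lo rest rfl).elim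

-- ===== VERDICT (by name: the statement is the Claim_ definition above) =====
theorem verifyChecksum_spec : Claim_equal_verifyChecksum := by
  intro msg _ hpre
  obtain ⟨heven, hdisj⟩ := hpre
  have hchain := vc_chain msg 0 0 (by omega) (by omega)
  simp only [Nat.cast_zero] at hchain
  unfold Spec_verifyChecksum verifyChecksum verifyChecksum_alt
  rw [hchain, esum msg 0 (by norm_num) heven]
  simp only [List.drop_zero]
  set S := (pvPairVals msg).sum with hS
  have hmod := vcRunA_modeq msg 0
  rw [zero_add] at hmod
  have key : (vcRunA 0 msg = 65535) ↔ (vcReduce S = 65535) := by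
    rw [vcReduce_eq_iff]
    rcases hdisj with hnd | hbounds
    · rw [PySem.Int.mod_eq_emod_of_pos (by norm_num : (0:Int) < 65535)] at hnd
      constructor
      · intro h
        have hdv := Int.ModEq.dvd hmod
        rw [h] at hdv
        exact absurd (by omega : S % 65535 = 0) hnd
      · rintro ⟨_, hdvd⟩
        exact absurd (by omega : S % 65535 = 0) hnd
    · obtain ⟨ha, hb, hz⟩ := vcRunA_inv msg 0 hbounds (by norm_num) (by norm_num)
      rw [zero_add] at hz
      have hdv := Int.ModEq.dvd hmod
      have hsn : 0 ≤ S := pairSum_nonneg msg hbounds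
      constructor
      · intro h
        rw [h] at hdv
        have hne : S ≠ 0 := fun hh => by have := hz.2 hh; omega
        exact ⟨by omega, by omega⟩
      · rintro ⟨hpos, hdvd⟩
        have hne : vcRunA 0 msg ≠ 0 := fun hh => by have := hz.1 hh; omega
        omega
  rw [Bool.eq_iff_iff]
  simpa only [beq_iff_eq] using key
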